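-- pv_equiv track=rewrite | github.com/posl/comment_recommendation | script/split_gen/4_time/en/170_D/9.py | find_divisible_numbers
-- ===== SOURCE A (Python) =====
-- def find_divisible_numbers(numbers):
--     numbers.sort()
--     numbers.reverse()
--     divisible_numbers = []
--     for i in range(len(numbers)):
--         if i == 0:
--             divisible_numbers.append(numbers[i])
--         else:
--             for j in range(len(divisible_numbers)):
--                 if divisible_numbers[j] % numbers[i] == 0:
--                     break
--                 elif j == len(divisible_numbers) - 1:
--                     divisible_numbers.append(numbers[i])
--     return divisible_numbers
-- ===== SOURCE B (Python) =====
-- def find_divisible_numbers(numbers):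
--     # Same in-place sort as the original (mutates the argument identically).
--     # Different algorithm: by transitivity of divisibility, a value survives
--     # iff NO earlier element of the descending order is a multiple of it --
--     # so we test against the input prefix and never consult the output list.
--     numbers.sort()
--     numbers.reverse()
--     result = []
--     for i, x in enumerate(numbers):
--         if all(y % x != 0 for y in numbers[:i]):
--             result.append(x)
--     return result
-- ===== Notes on version B (the rewrite author's own statement) =====
-- stated objective: simpler
-- what changed: Instead of the greedy inner loop over the growing output list with break/last-index bookkeeping, B tests each element against the whole input prefix (correct by transitivity of divisibility), so the decision no longer depends on the output being built.
import Mathlib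
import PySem

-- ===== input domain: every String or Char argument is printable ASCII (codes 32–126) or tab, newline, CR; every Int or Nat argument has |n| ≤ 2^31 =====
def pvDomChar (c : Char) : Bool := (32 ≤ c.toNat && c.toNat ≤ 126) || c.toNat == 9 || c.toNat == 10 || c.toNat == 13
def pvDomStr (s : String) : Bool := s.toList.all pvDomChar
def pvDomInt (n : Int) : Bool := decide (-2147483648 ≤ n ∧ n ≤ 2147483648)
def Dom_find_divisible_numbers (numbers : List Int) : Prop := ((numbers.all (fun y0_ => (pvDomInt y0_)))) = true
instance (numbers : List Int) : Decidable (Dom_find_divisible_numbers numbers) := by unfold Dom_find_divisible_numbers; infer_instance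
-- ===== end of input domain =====

-- B replaces A's greedy scan of the growing output list (with break /
-- last-index bookkeeping) by a test of each element against the input prefix,
-- correct by transitivity of divisibility; objective: simpler.  Both A and B
-- sort the argument list in place (the same mutation); the equivalence proved
-- here is about the return value.

-- ===== PORT A =====
-- A's inner 'for j in range(len(divisible_numbers))' loop with its break /
-- 'elif j == len(divisible_numbers) - 1: append' logic, as recursion on j
def innerA (kept : List Int) (x : Int) (j : Nat) : List Int :=
  if h : j < kept.length then
    if PySem.Int.mod kept[j] x == 0 then kept
    else if j == kept.length - 1 then kept ++ [x]
    else innerA kept x (j + 1)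
  else kept
termination_by kept.length - j

def find_divisible_numbers (numbers : List Int) : List Int :=
  let s := (PySem.List.sorted numbers (fun x => x) false).reverse
  (PySem.List.pyRange 0 (s.length : Int) 1).foldl
    (fun kept i =>
      if i == 0 then kept ++ [PySem.List.pyGetD s i 0]
      else innerA kept (PySem.List.pyGetD s i 0) 0) []

-- ===== PORT B =====
def find_divisible_numbers_alt (numbers : List Int) : List Int :=
  let s := (PySem.List.sorted numbers (fun x => x) false).reverse
  (PySem.List.enumerate s 0).foldl
    (fun res p =>
      if (PySem.List.slice s none (some p.1)).all (fun y => PySem.Int.mod y p.2 != 0)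
      then res ++ [p.2] else res) []

-- ===== PRECONDITION & SPEC =====
-- Pre_ excludes exactly the inputs on which the Python A raises
-- ZeroDivisionError: a 0 in the list that is not its unique maximum (then some
-- element is taken '% 0').  The Python B raises there too.
def Pre_find_divisible_numbers (numbers : List Int) : Prop :=
  0 ∈ numbers → numbers.count 0 = 1 ∧ ∀ y ∈ numbers, y ≤ 0
instance (numbers : List Int) : Decidable (Pre_find_divisible_numbers numbers) := by
  unfold Pre_find_divisible_numbers; infer_instance

def pvWitness_find_divisible_numbers : List Int := [6, 4, 3, 2]

def Spec_find_divisible_numbers (numbers : List Int) (out : List Int) : Prop :=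
  out = find_divisible_numbers_alt numbers
instance (numbers : List Int) (out : List Int) : Decidable (Spec_find_divisible_numbers numbers out) := by
  unfold Spec_find_divisible_numbers; infer_instance

-- ===== CLAIM (what is proved, stated in full; the proofs are below) =====
def Claim_equal_find_divisible_numbers : Prop := ∀ (numbers : List Int), Dom_find_divisible_numbers numbers → Pre_find_divisible_numbers numbers → Spec_find_divisible_numbers numbers (find_divisible_numbers numbers)

-- ===== LEMMAS AND PROOFS =====

-- A's inner loop, started at j < |kept|, appends x iff no element of
-- kept.drop j is a multiple of x.
theorem innerA_eq (kept : List Int) (x : Int) (j : Nat) (hj : j < kept.length) :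
    innerA kept x j =
      if (kept.drop j).all (fun z => !(PySem.Int.mod z x == 0)) then kept ++ [x] else kept := by
  have hdrop : kept.drop j = kept[j] :: kept.drop (j + 1) := List.drop_eq_getElem_cons hj
  rw [innerA, dif_pos hj, hdrop, List.all_cons]
  rcases hm : (PySem.Int.mod kept[j] x == 0) with _ | _
  · rw [if_neg (by simp), Bool.not_false, Bool.true_and]
    by_cases hlast : j = kept.length - 1
    · have hnil : kept.drop (j + 1) = [] := List.drop_eq_nil_of_le (by omega)
      rw [if_pos (by simpa using hlast), hnil, List.all_nil, if_pos rfl]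
    · have hj1 : j + 1 < kept.length := by omega
      rw [if_neg (by simpa using hlast), innerA_eq kept x (j + 1) hj1]
  · rw [if_pos (by simp), Bool.not_true, Bool.false_and, if_neg (by simp)]
termination_by kept.length - j

-- The two membership tests agree when kept ⊆ pre and every element of pre has
-- a multiple in kept (transitivity of divisibility).
theorem test_eq (kept pre : List Int) (x : Int)
    (h1 : ∀ z ∈ kept, z ∈ pre) (h2 : ∀ y ∈ pre, ∃ z ∈ kept, y ∣ z) :
    kept.all (fun z => !(PySem.Int.mod z x == 0)) =
      pre.all (fun y => !(PySem.Int.mod y x == 0)) := by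
  rcases hb : pre.all (fun y => !(PySem.Int.mod y x == 0)) with _ | _
  · rw [List.all_eq_false] at hb ⊢
    obtain ⟨y, hy, hyp⟩ := hb
    have hxy : x ∣ y := by
      by_contra hc
      exact hyp (by simpa [PySem.Int.mod_eq_zero_iff_dvd] using hc)
    obtain ⟨z, hz, hdvd⟩ := h2 y hy
    refine ⟨z, hz, fun hc => ?_⟩
    simp only [Bool.not_eq_eq_eq_not, Bool.not_true, beq_eq_false_iff_ne, ne_eq,
      PySem.Int.mod_eq_zero_iff_dvd] at hc
    exact hc (hxy.trans hdvd)
  · rw [List.all_eq_true] at hb ⊢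
    exact fun z hz => hb z (h1 z hz)

-- Main loop invariant: past the first element the two folds agree, where
-- pre is the prefix already consumed and kept the common accumulator.
theorem main_loop (rest : List Int) :
    ∀ (pre kept : List Int), pre ≠ [] → kept ≠ [] →
      (∀ z ∈ kept, z ∈ pre) → (∀ y ∈ pre, ∃ z ∈ kept, y ∣ z) →
      rest.foldl (fun k x => innerA k x 0) kept =
        (PySem.List.enumerate rest (pre.length : Int)).foldl
          (fun res p =>
            if (PySem.List.slice (pre ++ rest) none (some p.1)).all
                (fun y => PySem.Int.mod y p.2 != 0)
            then res ++ [p.2] else res) kept := by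
  induction rest with
  | nil => intro pre kept _ _ _ _; rfl
  | cons x rest' ih =>
    intro pre kept hpre hkept h1 h2
    rw [List.foldl_cons, PySem.List.enumerate_cons, List.foldl_cons]
    have h0 : 0 < kept.length := List.length_pos_iff.mpr hkept
    have hslice : PySem.List.slice (pre ++ x :: rest') none (some (pre.length : Int)) = pre := by
      rw [PySem.List.slice_to_natCast]
      simp
    rw [innerA_eq kept x 0 h0, List.drop_zero]
    dsimp only
    rw [hslice]
    have hbne : (fun y => PySem.Int.mod y x != 0) = (fun y => !(PySem.Int.mod y x == 0)) := rfl
    rw [hbne, test_eq kept pre x h1 h2]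
    have hassoc : pre ++ x :: rest' = (pre ++ [x]) ++ rest' := by simp
    have hlen : (pre.length : Int) + 1 = (((pre ++ [x]).length : Nat) : Int) := by simp
    rcases hc : pre.all (fun y => !(PySem.Int.mod y x == 0)) with _ | _
    · -- x is not appended: some element of pre (hence of kept) is a multiple of x
      have hx : ∃ z ∈ kept, x ∣ z := by
        rw [List.all_eq_false] at hc
        obtain ⟨y, hy, hyp⟩ := hc
        have hxy : x ∣ y := by
          by_contra hcc
          exact hyp (by simpa [PySem.Int.mod_eq_zero_iff_dvd] using hcc)
        obtain ⟨z, hz, hdvd⟩ := h2 y hy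
        exact ⟨z, hz, hxy.trans hdvd⟩
      have := ih (pre ++ [x]) kept (by simp) hkept
        (fun z hz => by simp [h1 z hz])
        (fun y hy => by
          rcases List.mem_append.mp hy with h | h
          · exact h2 y h
          · simp at h; subst h; exact hx)
      rw [hassoc, hlen]; exact this
    · -- x is appended on both sides
      have := ih (pre ++ [x]) (kept ++ [x]) (by simp) (by simp)
        (fun z hz => by
          rcases List.mem_append.mp hz with h | h
          · simp [h1 z h]
          · simp at h; simp [h])
        (fun y hy => by
          rcases List.mem_append.mp hy with h | h
          · obtain ⟨z, hz, hd⟩ := h2 y h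
            exact ⟨z, by simp [hz], hd⟩
          · simp at h; exact ⟨x, by simp, by rw [h]⟩)
      rw [hassoc, hlen]; exact this

-- A's fold over 'enumerate' with start index ≥ 1 never takes the i == 0
-- branch: it is the plain fold of the inner loop.
theorem foldA_enum (t : List Int) :
    ∀ (n : Int) (kept : List Int), 1 ≤ n →
      (PySem.List.enumerate t n).foldl
        (fun res p => if p.1 == 0 then res ++ [p.2] else innerA res p.2 0) kept =
      t.foldl (fun k x => innerA k x 0) kept := by
  induction t with
  | nil => intro n kept _; rfl
  | cons x t' ih =>
    intro n kept hn
    rw [PySem.List.enumerate_cons, List.foldl_cons, List.foldl_cons]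
    dsimp only
    rw [if_neg (by simp; omega)]
    exact ih (n + 1) (innerA kept x 0) (by omega)

-- ===== VERDICT (by name: the statement is the Claim_ definition above) =====
theorem find_divisible_numbers_spec : Claim_equal_find_divisible_numbers := by
  unfold Claim_equal_find_divisible_numbers Spec_find_divisible_numbers
  intro numbers _ _
  unfold find_divisible_numbers find_divisible_numbers_alt
  simp only []
  generalize (PySem.List.sorted numbers (fun x => x) false).reverse = s
  have hA : (PySem.List.pyRange 0 (s.length : Int) 1).foldl
      (fun kept i =>
        if i == 0 then kept ++ [PySem.List.pyGetD s i 0]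
        else innerA kept (PySem.List.pyGetD s i 0) 0) [] =
      (PySem.List.enumerate s 0).foldl
        (fun res p => if p.1 == 0 then res ++ [p.2] else innerA res p.2 0) [] := by
    rw [PySem.List.enumerate_eq_map_pyRange (d := 0), List.foldl_map]
    rfl
  rw [hA]
  cases s with
  | nil => rfl
  | cons x0 t =>
    rw [PySem.List.enumerate_cons, List.foldl_cons, List.foldl_cons]
    dsimp only
    rw [if_pos (show ((0:Int) == 0) = true from rfl)]
    have hsl0 : PySem.List.slice (x0 :: t) none (some 0) = [] := by
      rfl
    rw [hsl0, List.all_nil, if_pos rfl]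
    rw [foldA_enum t (0 + 1) ([] ++ [x0]) (by omega)]
    have := main_loop t [x0] [x0] (by simp) (by simp) (by simp)
      (fun y hy => ⟨x0, by simp, by simp at hy; rw [hy]⟩)
    simpa using this
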